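-- pv_equiv track=rewrite | github.com/SurjaHead/softmax-in-hardware | tests/test_param_sys_array.py | pack_weights_4x4_16bit
-- ===== SOURCE A (Python) =====
-- def pack_weights_4x4_16bit(weights):
--     """
--     Pack a 4x4 list of 16-bit weights (weights[i][j]) into a single 256-bit integer.
--     w_in[(i*4 + j)*16 +: 16] = weights[i][j].
--     """
--     big_val = 0
--     for i in range(4):
--         for j in range(4):
--             w_ij = weights[i][j] & 0xFFFF
--             shift_amount = 16 * (i * 4 + j)  # each weight is 16 bits
--             big_val |= (w_ij << shift_amount)
--     return big_val
-- ===== SOURCE B (Python) =====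
-- def pack_weights_4x4_16bit(weights):
--     """
--     Pack a 4x4 list of 16-bit weights into one 256-bit integer, Horner-style:
--     walk the grid backwards (row 3 down to row 0, column 3 down to column 0)
--     and shift the accumulator 16 bits per element, so each weight's position
--     comes from the shift history rather than an index formula.
--     """
--     big_val = 0
--     for i in (3, 2, 1, 0):
--         for j in (3, 2, 1, 0):
--             big_val = (big_val << 16) | (weights[i][j] & 0xFFFF)
--     return big_val
-- ===== Notes on version B (the rewrite author's own statement) =====
-- stated objective: alternative
-- what changed: Replaces the indexed OR (shift_amount = 16*(i*4+j) computed per element) with a Horner-style accumulator: traverse the grid in reverse row-major order and do big_val = (big_val << 16) | (w & 0xFFFF), so each weight's position comes from the shift history instead of an index formula.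
import Mathlib
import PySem

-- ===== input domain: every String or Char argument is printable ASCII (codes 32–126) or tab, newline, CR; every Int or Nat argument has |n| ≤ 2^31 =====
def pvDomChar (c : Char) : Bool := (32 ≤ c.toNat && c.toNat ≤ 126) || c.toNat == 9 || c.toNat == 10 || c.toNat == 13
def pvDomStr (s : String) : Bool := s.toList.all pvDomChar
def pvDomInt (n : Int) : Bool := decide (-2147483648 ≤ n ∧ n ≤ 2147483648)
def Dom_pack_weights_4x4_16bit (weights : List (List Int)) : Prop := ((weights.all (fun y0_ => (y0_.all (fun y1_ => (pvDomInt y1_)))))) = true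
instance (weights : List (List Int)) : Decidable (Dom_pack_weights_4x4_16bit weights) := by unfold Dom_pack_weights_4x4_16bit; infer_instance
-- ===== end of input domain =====

-- B packs the same 4x4 grid Horner-style: reverse traversal with a 16-bit shift of the
-- accumulator per element, instead of A's OR of each masked weight at an indexed offset.

-- ===== PORT A =====
-- shift_amount = 16*(i*4+j) is always ≥ 0 here, so `.toNat` is exactly Python's `<<` operand
def pack_weights_4x4_16bit (weights : List (List Int)) : Int :=
  (PySem.List.pyRange 0 4 1).foldl (fun big_val i =>
    (PySem.List.pyRange 0 4 1).foldl (fun big_val j =>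
      let w_ij := PySem.Int.band (PySem.List.pyGetD (PySem.List.pyGetD weights i []) j 0) 0xFFFF
      let shift_amount : Int := 16 * (i * 4 + j)
      PySem.Int.bor big_val (w_ij <<< shift_amount.toNat)) big_val) 0

-- ===== PORT B =====
def pack_weights_4x4_16bit_alt (weights : List (List Int)) : Int :=
  ([3, 2, 1, 0] : List Int).foldl (fun big_val i =>
    ([3, 2, 1, 0] : List Int).foldl (fun big_val j =>
      PySem.Int.bor (big_val <<< (16 : Nat))
        (PySem.Int.band (PySem.List.pyGetD (PySem.List.pyGetD weights i []) j 0) 0xFFFF)) big_val) 0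

-- ===== PRECONDITION & SPEC =====
-- A raises IndexError unless there are at least 4 rows and each of the first 4 rows has at least 4 entries.
def Pre_pack_weights_4x4_16bit (weights : List (List Int)) : Prop :=
  4 ≤ weights.length ∧ ∀ row ∈ weights.take 4, 4 ≤ row.length
instance (weights : List (List Int)) : Decidable (Pre_pack_weights_4x4_16bit weights) := by
  unfold Pre_pack_weights_4x4_16bit; infer_instance

def pvWitness_pack_weights_4x4_16bit : List (List Int) :=
  [[1, 2, 3, 4], [5, 6, 7, 8], [-1, -2, -3, -4], [0, 65535, 100, 7]]

def Spec_pack_weights_4x4_16bit (weights : List (List Int)) (out : Int) : Prop :=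
  out = pack_weights_4x4_16bit_alt weights
instance (weights : List (List Int)) (out : Int) : Decidable (Spec_pack_weights_4x4_16bit weights out) := by
  unfold Spec_pack_weights_4x4_16bit; infer_instance

-- ===== CLAIM (what is proved, stated in full; the proofs are below) =====
def Claim_equal_pack_weights_4x4_16bit : Prop :=
  ∀ (weights : List (List Int)), Dom_pack_weights_4x4_16bit weights →
    Pre_pack_weights_4x4_16bit weights →
    Spec_pack_weights_4x4_16bit weights (pack_weights_4x4_16bit weights)

-- ===== LEMMAS AND PROOFS =====

-- masking with 0xFFFF always lands in [0, 65536)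
theorem band_mask_to_nat (w : Int) :
    ∃ n : Nat, PySem.Int.band w 65535 = (n : Int) ∧ n < 65536 := by
  unfold PySem.Int.band
  split_ifs with h1 h2 h2
  · refine ⟨w.toNat &&& (65535 : Int).toNat, rfl, ?_⟩
    have h := Nat.and_lt_two_pow (w.toNat) (y := (65535 : Int).toNat) (n := 16) (by decide)
    have e : (2 : Nat) ^ 16 = 65536 := by norm_num
    omega
  · norm_num at h2
  · refine ⟨(65535 : Int).toNat - ((65535 : Int).toNat &&& (-w - 1).toNat), rfl, ?_⟩
    have : (65535 : Int).toNat = 65535 := rfl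
    omega
  · norm_num at h2

-- one step of A's accumulation: OR-ing a fresh field above the bits already filled is addition
theorem stepA (a b : Nat) (s : Nat) (C : Nat) (hC : 2 ^ s = C) (h : a < C) :
    a ||| b <<< s = C * b + a := by
  subst hC
  apply Nat.eq_of_testBit_eq
  intro j
  rw [Nat.testBit_lor, Nat.testBit_shiftLeft, Nat.testBit_two_pow_mul_add b h j]
  by_cases hj : j < s
  · simp [hj, Nat.not_le.mpr hj]
  · simp [hj, Nat.not_lt.mp hj, Nat.testBit_lt_two_pow (lt_of_lt_of_le h (Nat.pow_le_pow_right (by norm_num) (Nat.not_lt.mp hj)))]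

-- one step of B's accumulation: shifting the accumulator and OR-ing in a 16-bit field is Horner
theorem stepB (b x : Nat) (h : x < 65536) :
    (b <<< 16) ||| x = 65536 * b + x := by
  rw [Nat.lor_comm]
  exact stepA x b 16 65536 (by norm_num) h

-- ===== VERDICT (by name: the statement is the Claim_ definition above) =====
set_option maxHeartbeats 2000000 in
theorem pack_weights_4x4_16bit_spec : Claim_equal_pack_weights_4x4_16bit := by
  intro weights _ hpre
  obtain ⟨hlen, hrows⟩ := hpre
  obtain ⟨r0, r1, r2, r3, rest, rfl⟩ : ∃ r0 r1 r2 r3 rest,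
      weights = r0 :: r1 :: r2 :: r3 :: rest := by
    match weights, hlen with
    | a :: b :: c :: d :: t, _ => exact ⟨a, b, c, d, t, rfl⟩
  have h0 : 4 ≤ r0.length := hrows r0 (by simp)
  have h1 : 4 ≤ r1.length := hrows r1 (by simp)
  have h2 : 4 ≤ r2.length := hrows r2 (by simp)
  have h3 : 4 ≤ r3.length := hrows r3 (by simp)
  obtain ⟨a0, a1, a2, a3, t0, rfl⟩ : ∃ x0 x1 x2 x3 t, r0 = x0 :: x1 :: x2 :: x3 :: t := by
    match r0, h0 with | a :: b :: c :: d :: t, _ => exact ⟨a, b, c, d, t, rfl⟩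
  obtain ⟨b0, b1, b2, b3, t1, rfl⟩ : ∃ x0 x1 x2 x3 t, r1 = x0 :: x1 :: x2 :: x3 :: t := by
    match r1, h1 with | a :: b :: c :: d :: t, _ => exact ⟨a, b, c, d, t, rfl⟩
  obtain ⟨c0, c1, c2, c3, t2, rfl⟩ : ∃ x0 x1 x2 x3 t, r2 = x0 :: x1 :: x2 :: x3 :: t := by
    match r2, h2 with | a :: b :: c :: d :: t, _ => exact ⟨a, b, c, d, t, rfl⟩
  obtain ⟨d0, d1, d2, d3, t3, rfl⟩ : ∃ x0 x1 x2 x3 t, r3 = x0 :: x1 :: x2 :: x3 :: t := by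
    match r3, h3 with | a :: b :: c :: d :: t, _ => exact ⟨a, b, c, d, t, rfl⟩
  unfold Spec_pack_weights_4x4_16bit pack_weights_4x4_16bit pack_weights_4x4_16bit_alt
  simp only [show PySem.List.pyRange 0 4 1 = [0, 1, 2, 3] from by decide, List.foldl]
  simp only [PySem.List.pyGetD_ofNat']
  simp only [List.getD_cons_zero, List.getD_cons_succ]
  norm_num
  obtain ⟨n00, e00, l00⟩ := band_mask_to_nat a0
  obtain ⟨n01, e01, l01⟩ := band_mask_to_nat a1
  obtain ⟨n02, e02, l02⟩ := band_mask_to_nat a2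
  obtain ⟨n03, e03, l03⟩ := band_mask_to_nat a3
  obtain ⟨n10, e10, l10⟩ := band_mask_to_nat b0
  obtain ⟨n11, e11, l11⟩ := band_mask_to_nat b1
  obtain ⟨n12, e12, l12⟩ := band_mask_to_nat b2
  obtain ⟨n13, e13, l13⟩ := band_mask_to_nat b3
  obtain ⟨n20, e20, l20⟩ := band_mask_to_nat c0
  obtain ⟨n21, e21, l21⟩ := band_mask_to_nat c1
  obtain ⟨n22, e22, l22⟩ := band_mask_to_nat c2
  obtain ⟨n23, e23, l23⟩ := band_mask_to_nat c3
  obtain ⟨n30, e30, l30⟩ := band_mask_to_nat d0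
  obtain ⟨n31, e31, l31⟩ := band_mask_to_nat d1
  obtain ⟨n32, e32, l32⟩ := band_mask_to_nat d2
  obtain ⟨n33, e33, l33⟩ := band_mask_to_nat d3
  rw [e00, e01, e02, e03, e10, e11, e12, e13, e20, e21, e22, e23, e30, e31, e32, e33]
  rw [show (0 : Int) = ((0 : Nat) : Int) from rfl]
  simp only [← Int.natCast_shiftLeft, PySem.Int.bor_natCast]
  rw [Int.natCast_inj]
  simp only [Int.toNat, Nat.zero_or]
  rw [stepB _ _ l00, stepB _ _ l01, stepB _ _ l02, stepB _ _ l03,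
      stepB _ _ l10, stepB _ _ l11, stepB _ _ l12, stepB _ _ l13,
      stepB _ _ l20, stepB _ _ l21, stepB _ _ l22, stepB _ _ l23,
      stepB _ _ l30, stepB _ _ l31, stepB _ _ l32]
  rw [stepA _ _ 16 65536 (by norm_num) (by omega)]
  rw [stepA _ _ 32 4294967296 (by norm_num) (by omega)]
  rw [stepA _ _ 48 281474976710656 (by norm_num) (by omega)]
  rw [stepA _ _ 64 18446744073709551616 (by norm_num) (by omega)]
  rw [stepA _ _ 80 1208925819614629174706176 (by norm_num) (by omega)]
  rw [stepA _ _ 96 79228162514264337593543950336 (by norm_num) (by omega)]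
  rw [stepA _ _ 112 5192296858534827628530496329220096 (by norm_num) (by omega)]
  rw [stepA _ _ 128 340282366920938463463374607431768211456 (by norm_num) (by omega)]
  rw [stepA _ _ 144 22300745198530623141535718272648361505980416 (by norm_num) (by omega)]
  rw [stepA _ _ 160 1461501637330902918203684832716283019655932542976 (by norm_num) (by omega)]
  rw [stepA _ _ 176 95780971304118053647396689196894323976171195136475136 (by norm_num) (by omega)]
  rw [stepA _ _ 192 6277101735386680763835789423207666416102355444464034512896 (by norm_num) (by omega)]
  rw [stepA _ _ 208 411376139330301510538742295639337626245683966408394965837152256 (by norm_num) (by omega)]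
  rw [stepA _ _ 224 26959946667150639794667015087019630673637144422540572481103610249216 (by norm_num) (by omega)]
  rw [stepA _ _ 240 1766847064778384329583297500742918515827483896875618958121606201292619776 (by norm_num) (by omega)]
  ring
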